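-- pv_equiv track=rewrite | github.com/Andre-N-Costa/Laboratorios-Algoritmia-II | Treino2/erdos.py | bfs
-- ===== SOURCE A (Python) =====
-- def bfs(adj):
--     nErdos = {"Paul Erdos" : 0}
--     queue = ["Paul Erdos"]
--     while queue:
--         v = queue.pop(0)
--         if v in adj:
--             for autor in adj[v]:
--                 if autor not in nErdos:
--                     nErdos[autor] = nErdos[v] + 1
--                     queue.append(autor)
--     return nErdos
-- ===== SOURCE B (Python) =====
-- def bfs(adj):
--     # Level-synchronous BFS: process one whole frontier per round with an
--     # explicit distance counter instead of a FIFO queue reading nErdos[v]+1.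
--     nErdos = {"Paul Erdos": 0}
--     distance = 0
--     frontier = ["Paul Erdos"]
--     while frontier:
--         next_frontier = []
--         for v in frontier:
--             if v in adj:
--                 for autor in adj[v]:
--                     if autor not in nErdos:
--                         nErdos[autor] = distance + 1
--                         next_frontier.append(autor)
--         distance += 1
--         frontier = next_frontier
--     return nErdos
-- ===== Notes on version B (the rewrite author's own statement) =====
-- stated objective: alternative
-- what changed: Replaced the single FIFO queue popping one vertex at a time and reading nErdos[v]+1 with a level-synchronous BFS that processes a whole frontier per round and assigns distance+1 from an explicit level counter.
import Mathlib
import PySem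

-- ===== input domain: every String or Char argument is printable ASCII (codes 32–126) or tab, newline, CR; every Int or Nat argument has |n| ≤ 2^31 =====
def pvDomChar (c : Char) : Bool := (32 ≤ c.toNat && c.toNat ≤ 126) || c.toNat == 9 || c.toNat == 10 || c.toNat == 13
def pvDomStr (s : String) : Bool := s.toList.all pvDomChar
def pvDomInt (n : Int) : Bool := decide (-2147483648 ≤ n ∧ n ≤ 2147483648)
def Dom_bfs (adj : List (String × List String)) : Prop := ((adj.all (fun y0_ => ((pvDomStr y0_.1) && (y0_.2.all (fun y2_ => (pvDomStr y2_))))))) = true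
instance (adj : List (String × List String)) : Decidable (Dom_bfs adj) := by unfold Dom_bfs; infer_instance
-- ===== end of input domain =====

-- B replaces A's FIFO queue (pop(0), nErdos[v]+1) by level-synchronous BFS with a
-- distance counter; objective: alternative decomposition (return value proved equal).

-- Shared helper for the termination measures of both loops: the number of distinct
-- authors occurring in adj's value lists not yet recorded in nE.
def pvMiss (adj : PySem.Dict String (List String)) (nE : PySem.Dict String Int) : Nat :=
  ((adj.values.flatten).toFinset.filter (fun a => nE.contains a = false)).card

-- Generic shape of both inner loops (used only to state the measure lemma the ports
-- cite in decreasing_by; each port's own step is its literal transliteration).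
def pvStep (valf : PySem.Dict String Int → Int)
    (st : PySem.Dict String Int × List String) (a : String) :
    PySem.Dict String Int × List String :=
  if !(st.1.contains a) then (st.1.insert a (valf st.1), st.2 ++ [a]) else st

theorem pvFold_measure (adj : PySem.Dict String (List String))
    (valf : PySem.Dict String Int → Int) :
    ∀ (auts : List String) (st : PySem.Dict String Int × List String),
      (∀ a ∈ auts, a ∈ adj.values.flatten) →
      2 * pvMiss adj (auts.foldl (pvStep valf) st).1 + (auts.foldl (pvStep valf) st).2.length ≤
        2 * pvMiss adj st.1 + st.2.length := by
  intro auts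
  induction auts with
  | nil => intro st _; simp
  | cons a rest ih =>
    intro st hmem
    simp only [List.foldl_cons]
    refine le_trans (ih _ (fun x hx => hmem x (List.mem_cons_of_mem _ hx))) ?_
    by_cases hc : st.1.contains a = true
    · simp [pvStep, hc]
    · have hc' : st.1.contains a = false := by
        cases h : st.1.contains a
        · rfl
        · exact absurd h hc
      have hst : pvStep valf st a = (st.1.insert a (valf st.1), st.2 ++ [a]) := by
        simp [pvStep, hc']
      rw [hst]
      have hfil : ((adj.values.flatten).toFinset.filter
            (fun x => (st.1.insert a (valf st.1)).contains x = false)) =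
          ((adj.values.flatten).toFinset.filter (fun x => st.1.contains x = false)).erase a := by
        ext x
        simp only [Finset.mem_filter, Finset.mem_erase, PySem.Dict.contains_insert]
        constructor
        · rintro ⟨hxF, hx⟩
          simp only [Bool.or_eq_false_iff, beq_eq_false_iff_ne] at hx
          exact ⟨hx.1, hxF, hx.2⟩
        · rintro ⟨hne, hxF, hx⟩
          refine ⟨hxF, ?_⟩
          simp [hne, hx]
      have hamem : a ∈ ((adj.values.flatten).toFinset.filter (fun x => st.1.contains x = false)) := by
        refine Finset.mem_filter.mpr ⟨?_, hc'⟩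
        exact List.mem_toFinset.mpr (hmem a (List.mem_cons_self))
      have hcard := Finset.card_erase_of_mem hamem
      have hpos : 0 < ((adj.values.flatten).toFinset.filter (fun x => st.1.contains x = false)).card :=
        Finset.card_pos.mpr ⟨a, hamem⟩
      simp only [pvMiss, hfil, hcard, List.length_append, List.length_cons, List.length_nil]
      omega

-- ===== PORT A =====
-- Literal port of A's while-loop with a FIFO queue; queue.pop(0) is the head split.
-- Python's nErdos[v] never raises (v is only enqueued after insertion); ported as getD v 0.
def bfsStep (v : String) (st : PySem.Dict String Int × List String) (autor : String) :
    PySem.Dict String Int × List String :=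
  if !(st.1.contains autor) then (st.1.insert autor (st.1.getD v 0 + 1), st.2 ++ [autor]) else st

theorem bfsStep_eq (v : String) : bfsStep v = pvStep (fun m => m.getD v 0 + 1) := rfl

def bfsLoop (adj : PySem.Dict String (List String)) (nE : PySem.Dict String Int)
    (queue : List String) : PySem.Dict String Int :=
  match queue with
  | [] => nE
  | v :: qs =>
    match h : adj.get? v with   -- 'if v in adj: for autor in adj[v]: …'
    | some auts =>
        let st := auts.foldl (bfsStep v) (nE, qs)
        bfsLoop adj st.1 st.2
    | none => bfsLoop adj nE qs
termination_by 2 * pvMiss adj nE + queue.length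
decreasing_by
  · have hsub : ∀ a ∈ auts, a ∈ adj.values.flatten := by
      intro a ha
      exact List.mem_flatten.mpr ⟨auts,
        List.mem_map.mpr ⟨(v, auts), PySem.Dict.mem_items_of_get?_eq_some adj h, rfl⟩, ha⟩
    have h2 : 2 * pvMiss adj (auts.foldl (pvStep (fun m => m.getD v 0 + 1)) (nE, qs)).1 +
        (auts.foldl (pvStep (fun m => m.getD v 0 + 1)) (nE, qs)).2.length ≤
        2 * pvMiss adj nE + qs.length :=
      pvFold_measure adj (fun m => m.getD v 0 + 1) auts (nE, qs) hsub
    rw [bfsStep_eq]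
    simp only [List.length_cons]
    omega
  · simp only [List.length_cons]; omega

def bfs (adj : List (String × List String)) : List (String × Int) :=
  (bfsLoop (PySem.Dict.mk adj) (PySem.Dict.mk [("Paul Erdos", 0)]) ["Paul Erdos"]).items

-- ===== PORT B =====
-- Literal port of Source B: level-synchronous BFS with an explicit distance counter.
def bfsAltVisit (distance : Int) (st : PySem.Dict String Int × List String) (autor : String) :
    PySem.Dict String Int × List String :=
  if !(st.1.contains autor) then (st.1.insert autor (distance + 1), st.2 ++ [autor]) else st

theorem bfsAltVisit_eq (d : Int) : bfsAltVisit d = pvStep (fun _ => d + 1) := rfl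

def bfsAltLevel (adj : PySem.Dict String (List String)) (distance : Int)
    (st : PySem.Dict String Int × List String) (v : String) :
    PySem.Dict String Int × List String :=
  match adj.get? v with
  | some auts => auts.foldl (bfsAltVisit distance) st
  | none => st

theorem bfsAltLevel_measure (adj : PySem.Dict String (List String)) (d : Int) :
    ∀ (f : List String) (st : PySem.Dict String Int × List String),
      2 * pvMiss adj (f.foldl (bfsAltLevel adj d) st).1 + (f.foldl (bfsAltLevel adj d) st).2.length ≤
        2 * pvMiss adj st.1 + st.2.length := by
  intro f
  induction f with
  | nil => intro st; simp
  | cons v rest ih =>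
    intro st
    simp only [List.foldl_cons]
    refine le_trans (ih _) ?_
    unfold bfsAltLevel
    cases h : adj.get? v with
    | none => simp
    | some auts =>
      have hsub : ∀ a ∈ auts, a ∈ adj.values.flatten := by
        intro a ha
        exact List.mem_flatten.mpr ⟨auts,
          List.mem_map.mpr ⟨(v, auts), PySem.Dict.mem_items_of_get?_eq_some adj h, rfl⟩, ha⟩
      have := pvFold_measure adj (fun _ => d + 1) auts st hsub
      rw [bfsAltVisit_eq]
      exact this

def bfsAltLoop (adj : PySem.Dict String (List String)) (nE : PySem.Dict String Int)
    (distance : Int) (frontier : List String) : PySem.Dict String Int :=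
  match frontier with
  | [] => nE
  | _ :: _ =>
    let st := frontier.foldl (bfsAltLevel adj distance) (nE, [])
    bfsAltLoop adj st.1 (distance + 1) st.2
termination_by 2 * pvMiss adj nE + frontier.length
decreasing_by
  have h2 : 2 * pvMiss adj (frontier.foldl (bfsAltLevel adj distance) (nE, [])).1 +
      (frontier.foldl (bfsAltLevel adj distance) (nE, [])).2.length ≤
      2 * pvMiss adj nE + ([] : List String).length :=
    bfsAltLevel_measure adj distance frontier (nE, [])
  simp only [List.length_nil] at h2
  rename_i v qs
  simp only [List.foldl_attach, List.length_cons]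
  omega

def bfs_alt (adj : List (String × List String)) : List (String × Int) :=
  (bfsAltLoop (PySem.Dict.mk adj) (PySem.Dict.mk [("Paul Erdos", 0)]) 0 ["Paul Erdos"]).items

-- ===== PRECONDITION & SPEC =====
def Spec_bfs (adj : List (String × List String)) (out : List (String × Int)) : Prop := out = bfs_alt adj
instance (adj : List (String × List String)) (out : List (String × Int)) : Decidable (Spec_bfs adj out) := by unfold Spec_bfs; infer_instance

-- ===== CLAIM (what is proved, stated in full; the proofs are below) =====
def Claim_equal_bfs : Prop := ∀ (adj : List (String × List String)), Dom_bfs adj → Spec_bfs adj (bfs adj)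

-- ===== LEMMAS AND PROOFS =====

-- Equation lemmas for the two WF-recursive loops.
theorem bfsLoop_nil (adj : PySem.Dict String (List String)) (nE : PySem.Dict String Int) :
    bfsLoop adj nE [] = nE := by
  rw [bfsLoop]

theorem bfsLoop_cons_some (adj : PySem.Dict String (List String)) (nE : PySem.Dict String Int)
    (v : String) (qs : List String) (auts : List String) (h : adj.get? v = some auts) :
    bfsLoop adj nE (v :: qs) =
      bfsLoop adj (auts.foldl (bfsStep v) (nE, qs)).1 (auts.foldl (bfsStep v) (nE, qs)).2 := by
  rw [bfsLoop]
  split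
  · rename_i auts' h'
    rw [h] at h'
    cases h'
    rfl
  · rename_i h'
    rw [h] at h'
    cases h'

theorem bfsLoop_cons_none (adj : PySem.Dict String (List String)) (nE : PySem.Dict String Int)
    (v : String) (qs : List String) (h : adj.get? v = none) :
    bfsLoop adj nE (v :: qs) = bfsLoop adj nE qs := by
  rw [bfsLoop]
  split
  · rename_i auts' h'
    rw [h] at h'
    cases h'
  · rfl

theorem bfsAltLoop_nil (adj : PySem.Dict String (List String)) (nE : PySem.Dict String Int)
    (d : Int) : bfsAltLoop adj nE d [] = nE := by
  rw [bfsAltLoop]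

theorem bfsAltLoop_cons (adj : PySem.Dict String (List String)) (nE : PySem.Dict String Int)
    (d : Int) (v : String) (qs : List String) :
    bfsAltLoop adj nE d (v :: qs) =
      bfsAltLoop adj ((v :: qs).foldl (bfsAltLevel adj d) (nE, [])).1 (d + 1)
        ((v :: qs).foldl (bfsAltLevel adj d) (nE, [])).2 := by
  rw [bfsAltLoop]

-- Inner fold: the appended part of the queue is independent of the initial queue.
theorem pvFold_split (valf : PySem.Dict String Int → Int) :
    ∀ (auts : List String) (nE : PySem.Dict String Int) (q : List String),
      auts.foldl (pvStep valf) (nE, q) =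
        ((auts.foldl (pvStep valf) (nE, [])).1,
          q ++ (auts.foldl (pvStep valf) (nE, [])).2) := by
  intro auts
  induction auts with
  | nil => intro nE q; simp
  | cons a rest ih =>
    intro nE q
    simp only [List.foldl_cons]
    by_cases hc : nE.contains a = true
    · have h1 : pvStep valf (nE, q) a = (nE, q) := by simp [pvStep, hc]
      have h2 : pvStep valf (nE, []) a = (nE, []) := by simp [pvStep, hc]
      rw [h1, h2]; exact ih nE q
    · have hc' : nE.contains a = false := by
        cases h : nE.contains a
        · rfl
        · exact absurd h hc
      have h1 : pvStep valf (nE, q) a = (nE.insert a (valf nE), q ++ [a]) := by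
        simp [pvStep, hc']
      have h2 : pvStep valf (nE, []) a = (nE.insert a (valf nE), [a]) := by
        simp [pvStep, hc']
      rw [h1, h2, ih _ (q ++ [a]), ih _ [a]]
      simp

-- Inner fold only inserts fresh keys: existing bindings are preserved.
theorem pvFold_mono (valf : PySem.Dict String Int → Int) :
    ∀ (auts : List String) (st : PySem.Dict String Int × List String) (k : String) (x : Int),
      st.1.get? k = some x → (auts.foldl (pvStep valf) st).1.get? k = some x := by
  intro auts
  induction auts with
  | nil => intro st k x hx; exact hx
  | cons a rest ih =>
    intro st k x hx
    simp only [List.foldl_cons]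
    by_cases hc : st.1.contains a = true
    · have h1 : pvStep valf st a = st := by simp [pvStep, hc]
      rw [h1]; exact ih st k x hx
    · have hk : st.1.contains k = true := by
        rw [PySem.Dict.contains_eq_isSome_get?, hx]; rfl
      have hne : k ≠ a := by
        intro hkk; rw [hkk] at hk; exact hc hk
      refine ih _ k x ?_
      have hc' : st.1.contains a = false := by
        cases h : st.1.contains a
        · rfl
        · exact absurd h hc
      have h1 : pvStep valf st a = (st.1.insert a (valf st.1), st.2 ++ [a]) := by
        simp [pvStep, hc']
      rw [h1]
      exact (PySem.Dict.get?_insert_of_ne _ _ hne).trans hx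

-- If v is bound to d, A's value nErdos[v]+1 equals B's constant d+1 throughout the fold.
theorem pvFold_val (v : String) (d : Int) :
    ∀ (auts : List String) (st : PySem.Dict String Int × List String),
      st.1.get? v = some d →
      auts.foldl (pvStep (fun m => m.getD v 0 + 1)) st =
        auts.foldl (pvStep (fun _ => d + 1)) st := by
  intro auts
  induction auts with
  | nil => intro st _; rfl
  | cons a rest ih =>
    intro st hv
    simp only [List.foldl_cons]
    by_cases hc : st.1.contains a = true
    · have h1 : pvStep (fun m => m.getD v 0 + 1) st a = st := by simp [pvStep, hc]
      have h2 : pvStep (fun _ => d + 1) st a = st := by simp [pvStep, hc]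
      rw [h1, h2]; exact ih st hv
    · have hc' : st.1.contains a = false := by
        cases h : st.1.contains a
        · rfl
        · exact absurd h hc
      have hgd : st.1.getD v 0 = d := PySem.Dict.getD_of_get?_eq_some _ 0 hv
      have h1 : pvStep (fun m => m.getD v 0 + 1) st a =
          (st.1.insert a (d + 1), st.2 ++ [a]) := by
        simp [pvStep, hc', hgd]
      have h2 : pvStep (fun _ => d + 1) st a = (st.1.insert a (d + 1), st.2 ++ [a]) := by
        simp [pvStep, hc']
      rw [h1, h2]
      refine ih _ ?_
      have hkv : st.1.contains v = true := by
        rw [PySem.Dict.contains_eq_isSome_get?, hv]; rfl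
      have hne : v ≠ a := by
        intro hvv; rw [hvv] at hkv; exact hc hkv
      exact (PySem.Dict.get?_insert_of_ne _ _ hne).trans hv

-- One level: A's queue loop over f++g equals B's level fold over f with accumulator g.
theorem pvLevel (adj : PySem.Dict String (List String)) (d : Int) :
    ∀ (f : List String) (nE : PySem.Dict String Int) (g : List String),
      (∀ v ∈ f, nE.get? v = some d) →
      bfsLoop adj nE (f ++ g) =
        bfsLoop adj (f.foldl (bfsAltLevel adj d) (nE, g)).1
          (f.foldl (bfsAltLevel adj d) (nE, g)).2 := by
  intro f
  induction f with
  | nil => intro nE g _; simp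
  | cons v f' ih =>
    intro nE g hf
    have hv : nE.get? v = some d := hf v List.mem_cons_self
    simp only [List.cons_append, List.foldl_cons]
    cases hadj : adj.get? v with
    | none =>
      have hlv : bfsAltLevel adj d (nE, g) v = (nE, g) := by
        simp [bfsAltLevel, hadj]
      rw [bfsLoop_cons_none adj nE v (f' ++ g) hadj, hlv]
      exact ih nE g (fun u hu => hf u (List.mem_cons_of_mem _ hu))
    | some auts =>
      have hlv : bfsAltLevel adj d (nE, g) v = auts.foldl (pvStep (fun _ => d + 1)) (nE, g) := by
        simp [bfsAltLevel, hadj, bfsAltVisit_eq]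
      rw [bfsLoop_cons_some adj nE v (f' ++ g) auts hadj, hlv]
      rw [bfsStep_eq, pvFold_val v d auts (nE, f' ++ g) hv]
      rw [pvFold_split (fun _ => d + 1) auts nE (f' ++ g),
          pvFold_split (fun _ => d + 1) auts nE g]
      have hmono : ∀ u ∈ f',
          (auts.foldl (pvStep (fun _ => d + 1)) (nE, ([] : List String))).1.get? u = some d :=
        fun u hu => pvFold_mono _ auts (nE, []) u d (hf u (List.mem_cons_of_mem _ hu))
      have := ih (auts.foldl (pvStep (fun _ => d + 1)) (nE, [])).1
        (g ++ (auts.foldl (pvStep (fun _ => d + 1)) (nE, [])).2) hmono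
      simpa [List.append_assoc] using this

-- The const-valued inner fold preserves 'every queued author is bound to d+1'.
theorem pvFold_vals (d : Int) :
    ∀ (auts : List String) (st : PySem.Dict String Int × List String),
      (∀ a ∈ st.2, st.1.get? a = some (d + 1)) →
      ∀ a ∈ (auts.foldl (pvStep (fun _ => d + 1)) st).2,
        (auts.foldl (pvStep (fun _ => d + 1)) st).1.get? a = some (d + 1) := by
  intro auts
  induction auts with
  | nil => intro st h; exact h
  | cons a rest ih =>
    intro st hst
    simp only [List.foldl_cons]
    by_cases hc : st.1.contains a = true
    · have h1 : pvStep (fun _ => d + 1) st a = st := by simp [pvStep, hc]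
      rw [h1]; exact ih st hst
    · have hc' : st.1.contains a = false := by
        cases h : st.1.contains a
        · rfl
        · exact absurd h hc
      have h1 : pvStep (fun _ => d + 1) st a = (st.1.insert a (d + 1), st.2 ++ [a]) := by
        simp [pvStep, hc']
      rw [h1]
      refine ih _ ?_
      intro b hb
      rcases List.mem_append.mp hb with hb | hb
      · have hkb : st.1.contains b = true := by
          rw [PySem.Dict.contains_eq_isSome_get?, hst b hb]; rfl
        have hne : b ≠ a := by
          intro hba; rw [hba] at hkb; exact hc hkb
        exact (PySem.Dict.get?_insert_of_ne _ _ hne).trans (hst b hb)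
      · simp only [List.mem_singleton] at hb
        subst hb
        exact PySem.Dict.get?_insert_self _ _ _

-- Everything B puts into a frontier is bound to d+1 in the dict it carries along.
theorem pvLevel_vals (adj : PySem.Dict String (List String)) (d : Int) :
    ∀ (f : List String) (st : PySem.Dict String Int × List String),
      (∀ a ∈ st.2, st.1.get? a = some (d + 1)) →
      ∀ a ∈ (f.foldl (bfsAltLevel adj d) st).2,
        (f.foldl (bfsAltLevel adj d) st).1.get? a = some (d + 1) := by
  intro f
  induction f with
  | nil => intro st h; exact h
  | cons v f' ih =>
    intro st hst
    simp only [List.foldl_cons]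
    refine ih _ ?_
    unfold bfsAltLevel
    cases hadj : adj.get? v with
    | none => exact hst
    | some auts => rw [bfsAltVisit_eq]; exact pvFold_vals d auts st hst

theorem pvMain (adj : PySem.Dict String (List String)) :
    ∀ (n : Nat) (nE : PySem.Dict String Int) (d : Int) (f : List String),
      2 * pvMiss adj nE + f.length = n →
      (∀ v ∈ f, nE.get? v = some d) →
      bfsLoop adj nE f = bfsAltLoop adj nE d f := by
  intro n
  induction n using Nat.strong_induction_on with
  | _ n ih =>
    intro nE d f hn hf
    cases f with
    | nil => rw [bfsLoop_nil, bfsAltLoop_nil]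
    | cons v qs =>
      have hL := pvLevel adj d (v :: qs) nE [] hf
      simp only [List.append_nil] at hL
      rw [hL, bfsAltLoop_cons]
      have hvals : ∀ a ∈ ((v :: qs).foldl (bfsAltLevel adj d) (nE, [])).2,
          ((v :: qs).foldl (bfsAltLevel adj d) (nE, [])).1.get? a = some (d + 1) :=
        pvLevel_vals adj d (v :: qs) (nE, []) (by intro a ha; simp at ha)
      have hmeas : 2 * pvMiss adj ((v :: qs).foldl (bfsAltLevel adj d) (nE, [])).1 +
          ((v :: qs).foldl (bfsAltLevel adj d) (nE, [])).2.length ≤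
          2 * pvMiss adj nE + ([] : List String).length :=
        bfsAltLevel_measure adj d (v :: qs) (nE, [])
      simp only [List.length_nil] at hmeas
      exact ih _ (by simp only [List.length_cons] at hn; omega) _ _ _ rfl hvals

-- ===== VERDICT (by name: the statement is the Claim_ definition above) =====
theorem bfs_spec : Claim_equal_bfs := by
  intro adj _
  unfold Spec_bfs bfs bfs_alt
  rw [pvMain (PySem.Dict.mk adj) (2 * pvMiss (PySem.Dict.mk adj) (PySem.Dict.mk [("Paul Erdos", 0)]) + 1)
      _ 0 _ rfl]
  intro v hv
  simp only [List.mem_singleton] at hv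
  subst hv
  rfl
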